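-- pv_equiv track=rewrite | github.com/wtfzdotnet/storyteller | src/storyteller/github_storage.py | _extract_description_from_content
-- ===== SOURCE A (Python) =====
-- def _extract_description_from_content(content: str) -> str:
--     """Extract description from content (everything after first H1 header)."""
--     if not content:
--         return ""
--
--     lines = content.strip().split('\n')
--     description_lines = []
--     found_title = False
--
--     for line in lines:
--         if line.strip().startswith('# ') and not found_title:
--             found_title = True
--             continue
--         elif found_title:
--             description_lines.append(line)
--
--     return '\n'.join(description_lines).strip()
-- ===== SOURCE B (Python) =====
-- def _extract_description_from_content(content: str) -> str:
--     lines = content.strip().split('\n')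
--     idx = next((i for i, line in enumerate(lines)
--                 if line.strip().startswith('# ')), None)
--     if idx is None:
--         return ""
--     return '\n'.join(lines[idx + 1:]).strip()
-- ===== Notes on version B (the rewrite author's own statement) =====
-- stated objective: simpler
-- what changed: Replaces the flag+append accumulation loop with find-the-first-header-index (findIdx?/next over enumerate) and a single slice lines[idx+1:] joined and stripped.
import Mathlib
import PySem

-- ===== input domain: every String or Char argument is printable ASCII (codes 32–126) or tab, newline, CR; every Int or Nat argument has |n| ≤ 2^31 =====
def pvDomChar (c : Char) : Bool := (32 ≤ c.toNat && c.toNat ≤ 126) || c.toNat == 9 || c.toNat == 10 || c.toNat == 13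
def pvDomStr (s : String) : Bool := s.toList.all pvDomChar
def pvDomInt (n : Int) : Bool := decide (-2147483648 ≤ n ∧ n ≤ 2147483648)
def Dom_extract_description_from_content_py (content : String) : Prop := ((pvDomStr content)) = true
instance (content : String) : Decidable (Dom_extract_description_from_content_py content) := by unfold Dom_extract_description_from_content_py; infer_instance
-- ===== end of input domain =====

-- ===== PORT A =====
-- B changes only the decomposition (finds the header index, then slices), not speed; return values proved equal on Dom.
-- pvStepA: the body of A's for-loop (flag + append), named so the fold lemmas below can cite it.
def pvStepA (p : String → Bool) (acc : List String × Bool) (line : String) : List String × Bool :=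
  if p line && !acc.2 then (acc.1, true)
  else if acc.2 then (acc.1 ++ [line], acc.2)
  else acc

def extract_description_from_content_py (content : String) : String :=
  if content == "" then ""
  else
    -- content.strip().split('\n'); sep is the nonempty literal "\n", so split? is always some
    let lines := (PySem.Str.split? (PySem.Str.strip content) "\n").getD []
    let st := lines.foldl (pvStepA (fun line => PySem.Str.startswith (PySem.Str.strip line) "# ")) ([], false)
    PySem.Str.strip (PySem.Str.join "\n" st.1)

-- ===== PORT B =====
def extract_description_from_content_py_alt (content : String) : String :=
  let lines := (PySem.Str.split? (PySem.Str.strip content) "\n").getD []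
  match lines.findIdx? (fun line => PySem.Str.startswith (PySem.Str.strip line) "# ") with
  | none => ""
  | some i => PySem.Str.strip (PySem.Str.join "\n" (lines.drop (i + 1)))

-- ===== PRECONDITION & SPEC =====
def Spec_extract_description_from_content_py (content : String) (out : String) : Prop := out = extract_description_from_content_py_alt content
instance (content : String) (out : String) : Decidable (Spec_extract_description_from_content_py content out) := by unfold Spec_extract_description_from_content_py; infer_instance

-- ===== CLAIM (what is proved, stated in full; the proofs are below) =====
def Claim_equal_extract_description_from_content_py : Prop := ∀ (content : String), Dom_extract_description_from_content_py content → Spec_extract_description_from_content_py content (extract_description_from_content_py content)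

-- ===== LEMMAS AND PROOFS =====
theorem pv_foldl_true (p : String → Bool) (ls : List String) (acc : List String) :
    ls.foldl (pvStepA p) (acc, true) = (acc ++ ls, true) := by
  induction ls generalizing acc with
  | nil => simp
  | cons l ls ih =>
    rw [List.foldl_cons]
    have h1 : pvStepA p (acc, true) l = (acc ++ [l], true) := by simp [pvStepA]
    rw [h1, ih]; simp

theorem pv_foldl_false (p : String → Bool) (ls : List String) (acc : List String) :
    ls.foldl (pvStepA p) (acc, false) =
    (match ls.findIdx? p with
     | none => (acc, false)
     | some i => (acc ++ ls.drop (i + 1), true)) := by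
  induction ls generalizing acc with
  | nil => simp
  | cons l ls ih =>
    rw [List.foldl_cons]
    by_cases hp : p l = true
    · have h1 : pvStepA p (acc, false) l = (acc, true) := by simp [pvStepA, hp]
      rw [h1, pv_foldl_true]
      simp [List.findIdx?_cons, hp]
    · have h1 : pvStepA p (acc, false) l = (acc, false) := by simp [pvStepA, hp]
      rw [h1, ih]
      rw [List.findIdx?_cons]
      simp only [hp, if_false, Bool.false_eq_true]
      cases h : ls.findIdx? p <;> simp

-- ===== VERDICT (by name: the statement is the Claim_ definition above) =====
theorem extract_description_from_content_py_spec : Claim_equal_extract_description_from_content_py := by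
  intro content _
  unfold Spec_extract_description_from_content_py
  unfold extract_description_from_content_py extract_description_from_content_py_alt
  by_cases hc : content = ""
  · subst hc; rfl
  · simp only [beq_iff_eq, if_neg hc]
    rw [pv_foldl_false]
    cases h : ((PySem.Str.split? (PySem.Str.strip content) "\n").getD []).findIdx?
        (fun line => PySem.Str.startswith (PySem.Str.strip line) "# ") with
    | none => simp; rfl
    | some i => simp
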